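-- pv_equiv track=rewrite | github.com/gugolple/advent_of_code | 2015/11e.py | advanceChr
-- ===== SOURCE A (Python) =====
-- LETS_CHG = {
--     'a': 'b',
--     'b': 'c',
--     'c': 'd',
--     'd': 'e',
--     'e': 'f',
--     'f': 'g',
--     'g': 'h',
--     'h': 'i',
--     'i': 'j',
--     'j': 'k',
--     'k': 'l',
--     'l': 'm',
--     'm': 'n',
--     'n': 'o',
--     'o': 'p',
--     'p': 'q',
--     'q': 'r',
--     'r': 's',
--     's': 't',
--     't': 'u',
--     'u': 'v',
--     'v': 'w',
--     'w': 'x',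
--     'x': 'y',
--     'y': 'z',
--     'z': 'a',
-- }
--
-- INV_CHARS = set([
--     "i",
--     "o",
--     "l",
-- ])
--
-- def advanceChr(pwd, idx):
--     nchr = LETS_CHG[pwd[idx]]
--     invchr = False
--     while nchr in INV_CHARS:
--         nchr = LETS_CHG[nchr]
--         invchr = True
--     if invchr:
--         for sidx in range(idx+1, len(pwd)):
--             pwd[sidx] = 'a'
--     pwd[idx] = nchr
--     if nchr == 'a':
--         pwd = advanceChr(pwd, idx-1)
--     return pwd
-- ===== SOURCE B (Python) =====
-- # B: iterative carry loop; successor computed arithmetically from the char code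
-- # (no 26-entry table), invalid letters i/l/o skipped by a single extra bump.
-- # Like A, mutates pwd in place and returns it.
-- def advanceChr(pwd, idx):
--     while True:
--         c = pwd[idx]
--         n = chr(97 + (ord(c) - 96) % 26)
--         if n in ('i', 'l', 'o'):
--             n = chr(ord(n) + 1)
--             for sidx in range(idx + 1, len(pwd)):
--                 pwd[sidx] = 'a'
--         pwd[idx] = n
--         if n != 'a':
--             return pwd
--         idx -= 1
-- ===== Notes on version B (the rewrite author's own statement) =====
-- stated objective: alternative
-- what changed: A's table-driven tail recursion (a 26-entry successor dict plus an invalid-letter set, recursing on a carry) is replaced by an iterative while-loop over a mutable index whose successor and invalid-letter skip are computed arithmetically from the character code (chr/ord, mod 26), with no lookup tables.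
import Mathlib
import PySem

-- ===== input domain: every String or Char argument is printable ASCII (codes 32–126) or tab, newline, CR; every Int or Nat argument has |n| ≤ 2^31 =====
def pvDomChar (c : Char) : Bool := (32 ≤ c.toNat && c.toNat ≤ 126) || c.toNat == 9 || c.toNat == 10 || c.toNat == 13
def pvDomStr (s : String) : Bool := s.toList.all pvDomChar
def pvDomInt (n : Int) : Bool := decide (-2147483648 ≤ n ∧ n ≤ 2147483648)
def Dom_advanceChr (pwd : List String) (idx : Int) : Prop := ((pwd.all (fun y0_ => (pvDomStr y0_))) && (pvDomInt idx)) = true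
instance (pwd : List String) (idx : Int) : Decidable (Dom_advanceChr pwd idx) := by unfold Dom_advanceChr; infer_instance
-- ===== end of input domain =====

-- B replaces A's table-driven tail recursion by an iterative carry loop whose successor
-- is computed arithmetically from the character code (objective: alternative, no speed claim).
-- Both A and B mutate `pwd` in place in Python in exactly the same way and return it;
-- the theorems below are about the returned value.

-- ===== PORT A =====
-- the module constant LETS_CHG (a dict)
def pvLetsChg : PySem.Dict String String := PySem.Dict.ofList
  [("a","b"),("b","c"),("c","d"),("d","e"),("e","f"),("f","g"),("g","h"),("h","i"),
   ("i","j"),("j","k"),("k","l"),("l","m"),("m","n"),("n","o"),("o","p"),("p","q"),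
   ("q","r"),("r","s"),("s","t"),("t","u"),("u","v"),("v","w"),("w","x"),("x","y"),
   ("y","z"),("z","a")]

-- the module constant INV_CHARS (a set)
def pvInvChars : PySem.Set String := PySem.Set.ofList ["i", "o", "l"]

-- `while nchr in INV_CHARS: nchr = LETS_CHG[nchr]` with an invchr flag; fueled (fuel 26
-- exceeds any possible run through the 26-letter cycle); none = KeyError inside the loop
def pvSkipInvalid : Nat → String → Bool → Option (String × Bool)
  | 0, _, _ => none
  | f + 1, nchr, invchr =>
    if PySem.Set.contains pvInvChars nchr then
      match PySem.Dict.get? pvLetsChg nchr with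
      | none => none
      | some m => pvSkipInvalid f m true
    else some (nchr, invchr)

-- `for sidx in range(idx+1, len(pwd)): pwd[sidx] = 'a'` (assignments keep the length,
-- so len(pwd) is constant through the loop; every sidx is in range so pySetD is exact)
def pvResetA (pwd : List String) (lo : Int) : List String :=
  (PySem.List.pyRange lo pwd.length 1).foldl (fun acc sidx => PySem.List.pySetD acc sidx "a") pwd

-- the body of A; the tail recursion is fueled, none = an exception (KeyError/IndexError)
-- or fuel exhaustion (which Pre_ rules out: the carry chain visits each position at most twice)
def pvAdvA : Nat → List String → Int → Option (List String)
  | 0, _, _ => none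
  | f + 1, pwd, idx =>
    match PySem.List.pyGet? pwd idx with        -- pwd[idx]
    | none => none
    | some c =>
      match PySem.Dict.get? pvLetsChg c with    -- LETS_CHG[pwd[idx]]
      | none => none
      | some n0 =>
        match pvSkipInvalid 26 n0 false with
        | none => none
        | some (nchr, invchr) =>
          let pwd1 := if invchr then pvResetA pwd (idx + 1) else pwd
          let pwd2 := PySem.List.pySetD pwd1 idx nchr     -- pwd[idx] = nchr
          if nchr == "a" then pvAdvA f pwd2 (idx - 1) else some pwd2

def advanceChr (pwd : List String) (idx : Int) : List String :=
  (pvAdvA (pwd.length + idx.natAbs + 2) pwd idx).getD pwd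

-- ===== PORT B =====
-- `for sidx in range(idx + 1, len(pwd)): pwd[sidx] = 'a'`
def pvResetB (pwd : List String) (lo : Int) : List String :=
  (PySem.List.pyRange lo pwd.length 1).foldl (fun acc sidx => PySem.List.pySetD acc sidx "a") pwd

-- Source B's loop, fueled exactly like A's port; none = exception (IndexError, or the
-- TypeError ord() raises on a string that is not a single character) or fuel exhaustion
def pvAdvB : Nat → List String → Int → Option (List String)
  | 0, _, _ => none
  | f + 1, pwd, idx =>
    match PySem.List.pyGet? pwd idx with        -- c = pwd[idx]
    | none => none
    | some c =>
      match c.toList with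
      | [ch] =>                                  -- ord(c) needs a single character
        -- n = chr(97 + (ord(c) - 96) % 26)
        let n : Char := Char.ofNat (97 + PySem.Int.mod ((ch.toNat : Int) - 96) 26).toNat
        let (n2, pwd1) :=
          if n == 'i' || n == 'l' || n == 'o' then
            (Char.ofNat (n.toNat + 1), pvResetB pwd (idx + 1))   -- n = chr(ord(n)+1); reset suffix
          else (n, pwd)
        let pwd2 := PySem.List.pySetD pwd1 idx (String.ofList [n2])  -- pwd[idx] = n
        if n2 == 'a' then pvAdvB f pwd2 (idx - 1) else some pwd2
      | _ => none

def advanceChr_alt (pwd : List String) (idx : Int) : List String :=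
  (pvAdvB (pwd.length + idx.natAbs + 2) pwd idx).getD pwd

-- ===== PRECONDITION & SPEC =====
-- `s` is one of the 26 lowercase-letter keys of LETS_CHG
def pvIsLower (s : String) : Bool :=
  match s.toList with
  | [c] => decide (97 ≤ c.toNat) && decide (c.toNat ≤ 122)
  | _ => false

-- the element index that Python's pwd[idx] resolves to
def pvStart (pwd : List String) (idx : Int) : Nat :=
  (if 0 ≤ idx then idx else idx + pwd.length).toNat

def pvGd (pwd : List String) (j : Nat) : String := pwd.getD j ""

-- Pre_ is exactly the set of inputs on which A returns (anywhere else A raises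
-- KeyError/TypeError on a non-letter entry it reads, or IndexError): idx in Python range,
-- and, scanning down from the start position, the first entry that is not "z" exists before
-- the list's bottom (or, for idx ≥ 0, after wrapping once to the top end) and is a lowercase letter.
def Pre_advanceChr (pwd : List String) (idx : Int) : Prop :=
  -(pwd.length : Int) ≤ idx ∧ idx < pwd.length ∧
  ((∃ p, p ≤ pvStart pwd idx ∧ pvIsLower (pvGd pwd p) = true ∧ pvGd pwd p ≠ "z" ∧
      ∀ j, j ≤ pvStart pwd idx → p < j → pvGd pwd j = "z")
   ∨ (0 ≤ idx ∧ (∀ j, j ≤ pvStart pwd idx → pvGd pwd j = "z") ∧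
      ((∀ j, j < pwd.length → pvStart pwd idx < j → pvGd pwd j = "z")
       ∨ (∃ q, q < pwd.length ∧ pvStart pwd idx < q ∧ pvIsLower (pvGd pwd q) = true ∧
            pvGd pwd q ≠ "z" ∧ ∀ j, j < pwd.length → q < j → pvGd pwd j = "z"))))

instance (pwd : List String) (idx : Int) : Decidable (Pre_advanceChr pwd idx) := by
  unfold Pre_advanceChr; infer_instance

def pvWitness_advanceChr : List String × Int := (["a"], 0)

def Spec_advanceChr (pwd : List String) (idx : Int) (out : List String) : Prop := out = advanceChr_alt pwd idx
instance (pwd : List String) (idx : Int) (out : List String) : Decidable (Spec_advanceChr pwd idx out) := by unfold Spec_advanceChr; infer_instance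

-- ===== CLAIM (what is proved, stated in full; the proofs are below) =====
def Claim_equal_advanceChr : Prop := ∀ (pwd : List String) (idx : Int), Dom_advanceChr pwd idx → Pre_advanceChr pwd idx → Spec_advanceChr pwd idx (advanceChr pwd idx)

-- ===== LEMMAS AND PROOFS =====

-- character-level helpers (proof-only)
def pvNext (c : Char) : Char := Char.ofNat (97 + PySem.Int.mod ((c.toNat : Int) - 96) 26).toNat
def pvInvB (c : Char) : Bool := pvNext c == 'i' || pvNext c == 'l' || pvNext c == 'o'
def pvFin (c : Char) : Char := if pvInvB c then Char.ofNat ((pvNext c).toNat + 1) else pvNext c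
def pvLowChars : List Char :=
  ['a','b','c','d','e','f','g','h','i','j','k','l','m','n','o','p','q','r','s','t','u','v','w','x','y','z']

lemma pv_mem_lowChars (c : Char) (h1 : 97 ≤ c.toNat) (h2 : c.toNat ≤ 122) : c ∈ pvLowChars := by
  have hc : c = Char.ofNat c.toNat := by
    rw [Char.ofNat_toNat]
  rw [hc]
  interval_cases h : c.toNat <;> decide

lemma pvIsLower_elim (s : String) (h : pvIsLower s = true) :
    ∃ c, s = String.ofList [c] ∧ c ∈ pvLowChars := by
  unfold pvIsLower at h
  rcases hsl : s.toList with _ | ⟨c, _ | ⟨d, tl⟩⟩ <;> rw [hsl] at h <;> try simp at h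
  refine ⟨c, ?_, pv_mem_lowChars c h.1 h.2⟩
  have := congrArg String.ofList hsl
  simpa using this

set_option maxRecDepth 8192 in
lemma pv_lookup_next : ∀ c ∈ pvLowChars,
    PySem.Dict.get? pvLetsChg (String.ofList [c]) = some (String.ofList [pvNext c]) := by
  intro c hc; fin_cases hc <;> decide

set_option maxRecDepth 8192 in
lemma pv_skip_eq : ∀ c ∈ pvLowChars,
    pvSkipInvalid 26 (String.ofList [pvNext c]) false = some (String.ofList [pvFin c], pvInvB c) := by
  intro c hc; fin_cases hc <;> decide

set_option maxRecDepth 8192 in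
lemma pv_strEqA : ∀ c ∈ pvLowChars,
    (String.ofList [pvFin c] == "a") = (pvFin c == 'a') := by
  intro c hc; fin_cases hc <;> decide

set_option maxRecDepth 8192 in
lemma pv_fin_ne_a : ∀ c ∈ pvLowChars, c ≠ 'z' → (pvFin c == 'a') = false := by
  intro c hc hne; fin_cases hc <;> first | decide | exact absurd rfl hne

lemma pv_reset_eq : pvResetB = pvResetA := rfl

-- the carry chain A's recursion follows; each constructor is one successful call
inductive PvChain : List String → Int → Prop where
  | stop (pwd : List String) (idx : Int) (c : Char) :
      PySem.List.pyGet? pwd idx = some (String.ofList [c]) → c ∈ pvLowChars → c ≠ 'z' →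
      PvChain pwd idx
  | carry (pwd : List String) (idx : Int) :
      PySem.List.pyGet? pwd idx = some "z" →
      PvChain (PySem.List.pySetD pwd idx "a") (idx - 1) → PvChain pwd idx

lemma pvAB_eq : ∀ (f : Nat) (pwd : List String) (idx : Int),
    PvChain pwd idx → pvAdvA f pwd idx = pvAdvB f pwd idx := by
  intro f
  induction f with
  | zero => intro pwd idx _; rfl
  | succ f ih =>
    intro pwd idx h
    have hBn : ∀ x : Char,
        (Char.ofNat (97 + PySem.Int.mod ((x.toNat : Int) - 96) 26).toNat) = pvNext x :=
      fun _ => rfl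
    have hBI : ∀ x : Char, (pvNext x == 'i' || pvNext x == 'l' || pvNext x == 'o') = pvInvB x :=
      fun _ => rfl
    cases h with
    | stop pwd idx c hget hmem hne =>
      have htl : (String.ofList [c]).toList = [c] := by simp
      have hfa : (String.ofList [pvFin c] == "a") = (pvFin c == 'a') := pv_strEqA c hmem
      have hne' : (pvFin c == 'a') = false := pv_fin_ne_a c hmem hne
      simp only [pvAdvA, pvAdvB, hget, htl, pv_lookup_next c hmem, pv_skip_eq c hmem,
        pv_reset_eq, hfa, hne', hBn, hBI]
      cases hI : pvInvB c with
      | true =>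
        have hF : pvFin c = Char.ofNat ((pvNext c).toNat + 1) := by simp [pvFin, hI]
        simp [← hF, hne']
      | false =>
        have hF : pvFin c = pvNext c := by simp [pvFin, hI]
        simp [← hF, hne']
    | carry pwd idx hget hch =>
      have h1 : PySem.Dict.get? pvLetsChg "z" = some "a" := by decide
      have h2 : pvSkipInvalid 26 "a" false = some ("a", false) := by decide
      have h3 : ("z" : String).toList = ['z'] := by decide
      have h4 : pvNext 'z' = 'a' := by decide
      have h5 : pvInvB 'z' = false := by decide
      have h6 : String.ofList ['a'] = "a" := by decide
      simp only [pvAdvA, pvAdvB, hget, h1, h2, h3, hBn, h4, Bool.false_eq_true,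
        if_false, beq_self_eq_true, if_pos]
      exact ih _ _ hch

-- index-resolution lemmas
lemma pv_pyGet_nonneg (pwd : List String) (idx : Int) (e : Nat)
    (h0 : 0 ≤ idx) (he : idx = (e : Int)) (hl : e < pwd.length) :
    PySem.List.pyGet? pwd idx = some (pvGd pwd e) := by
  subst he
  simp [PySem.List.pyGet?, PySem.List.pyIdx?, hl, pvGd, List.getD_eq_getElem?_getD]

lemma pv_pyGet_neg (pwd : List String) (idx : Int) (e : Nat)
    (h0 : idx < 0) (he : idx + (pwd.length : Int) = (e : Int)) (hl : e < pwd.length) :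
    PySem.List.pyGet? pwd idx = some (pvGd pwd e) := by
  have h1 : ¬ (0 ≤ idx) := by omega
  have h2 : -(pwd.length : Int) ≤ idx := by omega
  have h3 : pwd.length - (-idx).toNat = e := by omega
  simp only [PySem.List.pyGet?, PySem.List.pyIdx?, if_neg h1, if_pos h2, h3, Option.bind]
  simp [pvGd, List.getD_eq_getElem?_getD, List.getElem?_eq_getElem hl]

lemma pv_pySet_nonneg (pwd : List String) (idx : Int) (e : Nat) (v : String)
    (h0 : 0 ≤ idx) (he : idx = (e : Int)) (hl : e < pwd.length) :
    PySem.List.pySetD pwd idx v = pwd.set e v := by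
  subst he
  simp [PySem.List.pySetD, PySem.List.pySet?, PySem.List.pyIdx?, hl]

lemma pv_pySet_neg (pwd : List String) (idx : Int) (e : Nat) (v : String)
    (h0 : idx < 0) (he : idx + (pwd.length : Int) = (e : Int)) (_hl : e < pwd.length) :
    PySem.List.pySetD pwd idx v = pwd.set e v := by
  have h1 : ¬ (0 ≤ idx) := by omega
  have h2 : -(pwd.length : Int) ≤ idx := by omega
  have h3 : pwd.length - (-idx).toNat = e := by omega
  simp only [PySem.List.pySetD, PySem.List.pySet?, PySem.List.pyIdx?, if_neg h1, if_pos h2, h3,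
    Option.map, Option.getD]

lemma pvGd_set_ne (pwd : List String) (e j : Nat) (v : String) (h : j ≠ e) :
    pvGd (pwd.set e v) j = pvGd pwd j := by
  simp [pvGd, List.getD_eq_getElem?_getD, List.getElem?_set_ne (by omega : e ≠ j)]

lemma pvGd_set_self (pwd : List String) (e : Nat) (v : String) (h : e < pwd.length) :
    pvGd (pwd.set e v) e = v := by
  simp [pvGd, List.getD_eq_getElem?_getD, h]

-- chain construction, negative index side (no wrap is possible any more)
lemma pvChain_neg : ∀ (e : Nat) (pwd : List String) (idx : Int),
    idx < 0 → idx + (pwd.length : Int) = (e : Int) → e < pwd.length →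
    (∃ p, p ≤ e ∧ pvIsLower (pvGd pwd p) = true ∧ pvGd pwd p ≠ "z" ∧
        ∀ j, j ≤ e → p < j → pvGd pwd j = "z") →
    PvChain pwd idx := by
  intro e
  induction e using Nat.strong_induction_on with
  | _ e IH =>
    intro pwd idx h0 he hl hp
    obtain ⟨p, hpe, hplow, hpnz, hz⟩ := hp
    have hget : PySem.List.pyGet? pwd idx = some (pvGd pwd e) := pv_pyGet_neg pwd idx e h0 he hl
    by_cases hez : pvGd pwd e = "z"
    · have hpe' : p < e := by
        rcases Nat.lt_or_ge p e with h | h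
        · exact h
        · have hpeq : p = e := by omega
          rw [hpeq] at hpnz; exact absurd hez hpnz
      have hepos : 0 < e := by omega
      apply PvChain.carry pwd idx (by rw [hget, hez])
      rw [pv_pySet_neg pwd idx e "a" h0 he hl]
      apply IH (e - 1) (by omega) _ _ (by omega)
        (by simp only [List.length_set]; omega) (by simp only [List.length_set]; omega)
      refine ⟨p, by omega, ?_, ?_, ?_⟩
      · rw [pvGd_set_ne pwd e p "a" (by omega)]; exact hplow
      · rw [pvGd_set_ne pwd e p "a" (by omega)]; exact hpnz
      · intro j hj1 hj2
        rw [pvGd_set_ne pwd e j "a" (by omega)]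
        exact hz j (by omega) hj2
    · have hp' : p = e := by
        by_contra hne2
        exact hez (hz e (by omega) (by omega))
      rw [hp'] at hplow hpnz
      obtain ⟨c, hc1, hc2⟩ := pvIsLower_elim _ hplow
      have hcz : c ≠ 'z' := by
        intro hcc
        rw [hcc] at hc1
        exact hpnz (by rw [hc1])
      exact PvChain.stop pwd idx c (by rw [hget, hc1]) hc2 hcz

-- chain construction, nonnegative index side
lemma pvChain_pos : ∀ (n : Nat) (pwd : List String),
    n < pwd.length →
    ((∃ p, p ≤ n ∧ pvIsLower (pvGd pwd p) = true ∧ pvGd pwd p ≠ "z" ∧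
        ∀ j, j ≤ n → p < j → pvGd pwd j = "z")
     ∨ ((∀ j, j ≤ n → pvGd pwd j = "z") ∧
        ((∀ j, j < pwd.length → n < j → pvGd pwd j = "z")
         ∨ (∃ q, q < pwd.length ∧ n < q ∧ pvIsLower (pvGd pwd q) = true ∧
              pvGd pwd q ≠ "z" ∧ ∀ j, j < pwd.length → q < j → pvGd pwd j = "z")))) →
    PvChain pwd (n : Int) := by
  intro n
  induction n using Nat.strong_induction_on with
  | _ n IH =>
    intro pwd hl H
    have hget : PySem.List.pyGet? pwd (n : Int) = some (pvGd pwd n) :=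
      pv_pyGet_nonneg pwd (n : Int) n (by omega) rfl hl
    by_cases hz : pvGd pwd n = "z"
    · apply PvChain.carry _ _ (by rw [hget, hz])
      rw [pv_pySet_nonneg pwd (n : Int) n "a" (by omega) rfl hl]
      -- the second disjunct of H when p would have to be n contradicts hz, etc.
      cases n with
      | zero =>
        rcases H with ⟨p, hpe, _, hpnz, _⟩ | ⟨_, hhigh⟩
        · have : p = 0 := by omega
          rw [this] at hpnz; exact absurd hz hpnz
        · show PvChain (pwd.set 0 "a") ((0 : Int) - 1)
          have hlen : 1 ≤ pwd.length := by omega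
          have hls : (pwd.set 0 "a").length = pwd.length := by simp
          apply pvChain_neg (pwd.length - 1) _ _ (by omega)
            (by simp only [List.length_set]; omega) (by simp only [List.length_set]; omega)
          rcases hhigh with hall | ⟨q, hq1, hq2, hq3, hq4, hq5⟩
          · refine ⟨0, by omega, ?_, ?_, ?_⟩
            · rw [pvGd_set_self pwd 0 "a" (by omega)]; decide
            · rw [pvGd_set_self pwd 0 "a" (by omega)]; decide
            · intro j hj1 hj2
              rw [pvGd_set_ne pwd 0 j "a" (by omega)]
              exact hall j (by omega) (by omega)
          · refine ⟨q, by omega, ?_, ?_, ?_⟩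
            · rw [pvGd_set_ne pwd 0 q "a" (by omega)]; exact hq3
            · rw [pvGd_set_ne pwd 0 q "a" (by omega)]; exact hq4
            · intro j hj1 hj2
              rw [pvGd_set_ne pwd 0 j "a" (by omega)]
              exact hq5 j (by omega) (by omega)
      | succ m =>
        have hcast : ((m + 1 : Nat) : Int) - 1 = ((m : Nat) : Int) := by push_cast; ring
        have hls : (pwd.set (m + 1) "a").length = pwd.length := by simp
        rw [hcast]
        apply IH m (by omega) _ (by simp only [List.length_set]; omega)
        rcases H with ⟨p, hpe, hplow, hpnz, hpz⟩ | ⟨hall, hhigh⟩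
        · left
          have hpm : p ≤ m := by
            rcases Nat.lt_or_ge p (m + 1) with h | h
            · omega
            · have : p = m + 1 := by omega
              rw [this] at hpnz; exact absurd hz hpnz
          refine ⟨p, hpm, ?_, ?_, ?_⟩
          · rw [pvGd_set_ne pwd (m + 1) p "a" (by omega)]; exact hplow
          · rw [pvGd_set_ne pwd (m + 1) p "a" (by omega)]; exact hpnz
          · intro j hj1 hj2
            rw [pvGd_set_ne pwd (m + 1) j "a" (by omega)]
            exact hpz j (by omega) hj2
        · right
          constructor
          · intro j hj
            rw [pvGd_set_ne pwd (m + 1) j "a" (by omega)]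
            exact hall j (by omega)
          · right
            rcases hhigh with hall2 | ⟨q, hq1, hq2, hq3, hq4, hq5⟩
            · refine ⟨m + 1, by simp only [List.length_set]; omega, by omega, ?_, ?_, ?_⟩
              · rw [pvGd_set_self pwd (m + 1) "a" (by omega)]; decide
              · rw [pvGd_set_self pwd (m + 1) "a" (by omega)]; decide
              · intro j hj1 hj2
                rw [pvGd_set_ne pwd (m + 1) j "a" (by omega)]
                exact hall2 j (by omega) (by omega)
            · refine ⟨q, by simp only [List.length_set]; omega, by omega, ?_, ?_, ?_⟩
              · rw [pvGd_set_ne pwd (m + 1) q "a" (by omega)]; exact hq3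
              · rw [pvGd_set_ne pwd (m + 1) q "a" (by omega)]; exact hq4
              · intro j hj1 hj2
                rw [pvGd_set_ne pwd (m + 1) j "a" (by omega)]
                exact hq5 j (by omega) (by omega)
    · rcases H with ⟨p, hpe, hplow, hpnz, hpz⟩ | ⟨hall, _⟩
      · have hp' : p = n := by
          by_contra hne2
          exact hz (hpz n (by omega) (by omega))
        rw [hp'] at hplow hpnz
        obtain ⟨c, hc1, hc2⟩ := pvIsLower_elim _ hplow
        have hcz : c ≠ 'z' := by
          intro hcc
          rw [hcc] at hc1
          exact hpnz (by rw [hc1])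
        exact PvChain.stop pwd _ c (by rw [hget, hc1]) hc2 hcz
      · exact absurd (hall n (by omega)) hz

lemma pv_pre_chain (pwd : List String) (idx : Int) (h : Pre_advanceChr pwd idx) :
    PvChain pwd idx := by
  obtain ⟨h1, h2, h3⟩ := h
  by_cases h0 : 0 ≤ idx
  · have hs : pvStart pwd idx = idx.toNat := by simp [pvStart, h0]
    have he : idx = ((idx.toNat : Nat) : Int) := by omega
    rw [he]
    apply pvChain_pos idx.toNat pwd (by omega)
    rw [hs] at h3
    rcases h3 with h | ⟨_, ha, hb⟩
    · exact Or.inl h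
    · exact Or.inr ⟨ha, hb⟩
  · have hs : pvStart pwd idx = (idx + pwd.length).toNat := by simp [pvStart, h0]
    apply pvChain_neg (pvStart pwd idx) pwd idx (by omega) (by rw [hs]; omega) (by omega)
    rw [hs] at h3 ⊢
    rcases h3 with h | ⟨hc, _⟩
    · exact h
    · exact absurd hc h0

-- ===== VERDICT (by name: the statement is the Claim_ definition above) =====
theorem advanceChr_spec : Claim_equal_advanceChr := by
  intro pwd idx _ hpre
  show advanceChr pwd idx = advanceChr_alt pwd idx
  unfold advanceChr advanceChr_alt
  rw [pvAB_eq _ _ _ (pv_pre_chain pwd idx hpre)]
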